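-- pv_equiv track=rewrite | github.com/imjohnlouie04/Arms-Engine | arms_engine/compression.py | count_archive_notes
-- ===== SOURCE A (Python) =====
-- def count_archive_notes(section):
--     count = 0
--     inside_notes = False
--     for raw_line in section.splitlines():
--         line = raw_line.strip()
--         if line.startswith("### Completed Notes"):
--             inside_notes = True
--             continue
--         if line.startswith("### ") and not line.startswith("### Completed Notes"):
--             inside_notes = False
--         if inside_notes and line.startswith("- "):
--             count += 1
--     return count
-- ===== SOURCE B (Python) =====
-- def count_archive_notes(section):
--     # Group stripped lines into (header, body) sections first, then count in a second pass.
--     sections = []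
--     header = None
--     body = []
--     for ln in (raw.strip() for raw in section.splitlines()):
--         if ln.startswith("### "):
--             if header is not None:
--                 sections.append((header, body))
--             header, body = ln, []
--         elif header is not None:
--             body.append(ln)
--     if header is not None:
--         sections.append((header, body))
--     return sum(
--         sum(1 for ln in body if ln.startswith("- "))
--         for hdr, body in sections
--         if hdr.startswith("### Completed Notes")
--     )
-- ===== Notes on version B (the rewrite author's own statement) =====
-- stated objective: alternative
-- what changed: Replaces the inline inside-notes flag with a two-pass decomposition: first group stripped lines into (header, body) sections, then sum the '- ' bullets of bodies under '### Completed Notes' headers.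
import Mathlib
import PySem

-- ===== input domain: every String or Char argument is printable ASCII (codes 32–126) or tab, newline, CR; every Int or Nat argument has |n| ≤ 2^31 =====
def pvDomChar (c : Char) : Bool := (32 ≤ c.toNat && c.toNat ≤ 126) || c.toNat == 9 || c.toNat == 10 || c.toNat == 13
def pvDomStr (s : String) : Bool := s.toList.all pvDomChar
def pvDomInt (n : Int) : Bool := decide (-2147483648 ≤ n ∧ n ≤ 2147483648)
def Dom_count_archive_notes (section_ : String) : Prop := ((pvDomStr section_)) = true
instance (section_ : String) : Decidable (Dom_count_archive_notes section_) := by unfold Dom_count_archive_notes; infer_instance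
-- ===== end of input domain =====

-- B replaces A's inline inside-notes flag with a two-pass grouping into sections; same cost, different decomposition.

-- ===== PORT A =====
def count_archive_notes (section_ : String) : Int :=
  ((PySem.Str.splitlines section_).foldl
    (fun (st : Int × Bool) raw_line =>
      let line := PySem.Str.strip raw_line
      if PySem.Str.startswith line "### Completed Notes" then (st.1, true)
      else
        let inside := if PySem.Str.startswith line "### " &&
                         !(PySem.Str.startswith line "### Completed Notes") then false else st.2
        (if inside && PySem.Str.startswith line "- " then st.1 + 1 else st.1, inside))
    (0, false)).1

-- ===== PORT B =====
-- flush the pending (header, body) into the sections list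
def caFlush (st : List (String × List String) × Option (String × List String)) :
    List (String × List String) :=
  match st.2 with
  | none => st.1
  | some hb => st.1 ++ [hb]

def count_archive_notes_alt (section_ : String) : Int :=
  let lines := (PySem.Str.splitlines section_).map PySem.Str.strip
  let st := lines.foldl
    (fun (st : List (String × List String) × Option (String × List String)) ln =>
      if PySem.Str.startswith ln "### " then (caFlush st, some (ln, []))
      else
        match st.2 with
        | none => st
        | some hb => (st.1, some (hb.1, hb.2 ++ [ln])))
    ([], none)
  let sections := caFlush st
  ((sections.filter (fun hb => PySem.Str.startswith hb.1 "### Completed Notes")).map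
    (fun hb => ((hb.2.filter (fun ln => PySem.Str.startswith ln "- ")).length : Int))).sum

-- ===== PRECONDITION & SPEC =====
def Spec_count_archive_notes (section_ : String) (out : Int) : Prop := out = count_archive_notes_alt section_
instance (section_ : String) (out : Int) : Decidable (Spec_count_archive_notes section_ out) := by unfold Spec_count_archive_notes; infer_instance

-- ===== CLAIM (what is proved, stated in full; the proofs are below) =====
def Claim_equal_count_archive_notes : Prop := ∀ (section_ : String), Dom_count_archive_notes section_ → Spec_count_archive_notes section_ (count_archive_notes section_)

-- ===== LEMMAS AND PROOFS =====

-- Everything below is stated over opaque predicates C (Completed-Notes header), P (any header),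
-- Bul (bullet) so the PySem simp bridges cannot interfere; the ports instantiate them by defeq.

-- common specification: the count over the remaining stripped lines, given the inside flag
def caSpecG (C P Bul : String → Bool) : List String → Bool → Int
  | [], _ => 0
  | ln :: rest, inside =>
    if C ln then caSpecG C P Bul rest true
    else if P ln then caSpecG C P Bul rest false
    else (if inside && Bul ln then 1 else 0) + caSpecG C P Bul rest inside

def caTotalG (C Bul : String → Bool) (secs : List (String × List String)) : Int :=
  ((secs.filter (fun hb => C hb.1)).map
    (fun hb => ((hb.2.filter (fun ln => Bul ln)).length : Int))).sum

def caInsideG (C : String → Bool) (cur : Option (String × List String)) : Bool :=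
  match cur with
  | none => false
  | some hb => C hb.1

-- a line starting with "### Completed Notes" starts with "### "
lemma ca_hdr_of_completed {ln : String}
    (h : PySem.Str.startswith ln "### Completed Notes" = true) :
    PySem.Str.startswith ln "### " = true := by
  simp only [PySem.Str.startswith_eq] at h ⊢
  rw [PySem.Chars.startswith_iff] at h ⊢
  exact List.IsPrefix.trans (by decide) h

lemma caA_fold (f : String → String) (C P Bul : String → Bool) (L : List String) :
    ∀ (c : Int) (i : Bool),
    (L.foldl
      (fun (st : Int × Bool) raw_line =>
        let line := f raw_line
        if C line then (st.1, true)
        else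
          let inside := if P line && !(C line) then false else st.2
          (if inside && Bul line then st.1 + 1 else st.1, inside))
      (c, i)).1 = c + caSpecG C P Bul (L.map f) i := by
  induction L with
  | nil => intro c i; simp [caSpecG]
  | cons hd tl ih =>
    intro c i
    simp only [List.foldl_cons, List.map_cons, caSpecG]
    by_cases hC : C (f hd) = true
    · simp only [hC, reduceIte]
      rw [ih]
    · simp only [Bool.not_eq_true] at hC
      by_cases hP : P (f hd) = true
      · rw [ih]; simp [hC, hP]
      · simp only [Bool.not_eq_true] at hP
        rw [ih]
        by_cases hB : (i && Bul (f hd)) = true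
        · simp [hC, hP, hB]; try omega
        · simp only [Bool.not_eq_true] at hB
          simp [hC, hP, hB]

lemma caTotalG_append_empty (C Bul : String → Bool) (secs : List (String × List String))
    (h : String) : caTotalG C Bul (secs ++ [(h, [])]) = caTotalG C Bul secs := by
  by_cases hC : C h = true <;> simp [caTotalG, List.filter_append, hC]

lemma caTotalG_flush_empty (C Bul : String → Bool) (st : List (String × List String) × Option (String × List String)) (h : String) :
    caTotalG C Bul (caFlush (caFlush st, some (h, []))) = caTotalG C Bul (caFlush st) := by
  simp [caFlush, caTotalG_append_empty]

lemma caTotalG_flush_body (C Bul : String → Bool) (secs : List (String × List String))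
    (h : String) (b : List String) (ln : String) :
    caTotalG C Bul (caFlush (secs, some (h, b ++ [ln]))) =
      caTotalG C Bul (caFlush (secs, some (h, b))) +
        (if C h && Bul ln then 1 else 0) := by
  simp only [caFlush, caTotalG, List.filter_append]
  by_cases hC : C h = true
  · by_cases hB : Bul ln = true <;> simp [hC, hB, List.filter_append] <;> push_cast <;> ring
  · simp [hC]

lemma caB_fold (C P Bul : String → Bool) (hCP : ∀ s, C s = true → P s = true)
    (L : List String) : ∀ (secs : List (String × List String))
    (cur : Option (String × List String)),
    caTotalG C Bul (caFlush (L.foldl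
      (fun (st : List (String × List String) × Option (String × List String)) ln =>
        if P ln then (caFlush st, some (ln, []))
        else
          match st.2 with
          | none => st
          | some hb => (st.1, some (hb.1, hb.2 ++ [ln])))
      (secs, cur))) = caTotalG C Bul (caFlush (secs, cur)) + caSpecG C P Bul L (caInsideG C cur) := by
  induction L with
  | nil => intro secs cur; simp [caSpecG]
  | cons hd tl ih =>
    intro secs cur
    simp only [List.foldl_cons, caSpecG]
    by_cases hC : C hd = true
    · have hP := hCP hd hC
      simp only [hC, hP, if_true]
      rw [ih, caTotalG_flush_empty]
      simp [caInsideG, hC]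
    · by_cases hP : P hd = true
      · simp only [hC, hP, if_true, if_false]
        rw [ih, caTotalG_flush_empty]
        simp [caInsideG, hC]
      · simp only [hC, hP, if_neg, reduceIte]
        match cur with
        | none => rw [ih]; simp [caInsideG]
        | some hb =>
          show caTotalG C Bul (caFlush (tl.foldl _ (secs, some (hb.1, hb.2 ++ [hd])))) = _
          rw [ih, caTotalG_flush_body]
          simp only [caInsideG]
          by_cases hH : C hb.1 = true
          · by_cases hB : Bul hd = true <;> simp [hH, hB] <;> ring
          · simp [hH]

-- ===== VERDICT (by name: the statement is the Claim_ definition above) =====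
set_option maxHeartbeats 1000000 in
theorem count_archive_notes_spec : Claim_equal_count_archive_notes := by
  intro section_ _
  unfold Spec_count_archive_notes
  have hA : count_archive_notes section_ =
      0 + caSpecG (fun l => PySem.Str.startswith l "### Completed Notes")
        (fun l => PySem.Str.startswith l "### ") (fun l => PySem.Str.startswith l "- ")
        ((PySem.Str.splitlines section_).map PySem.Str.strip) false :=
    caA_fold PySem.Str.strip (fun l => PySem.Str.startswith l "### Completed Notes")
      (fun l => PySem.Str.startswith l "### ") (fun l => PySem.Str.startswith l "- ")
      (PySem.Str.splitlines section_) 0 false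
  have hB : count_archive_notes_alt section_ =
      0 + caSpecG (fun l => PySem.Str.startswith l "### Completed Notes")
        (fun l => PySem.Str.startswith l "### ") (fun l => PySem.Str.startswith l "- ")
        ((PySem.Str.splitlines section_).map PySem.Str.strip) false :=
    caB_fold (fun l => PySem.Str.startswith l "### Completed Notes")
      (fun l => PySem.Str.startswith l "### ") (fun l => PySem.Str.startswith l "- ")
      (fun s hs => ca_hdr_of_completed hs)
      ((PySem.Str.splitlines section_).map PySem.Str.strip) [] none
  rw [hA, hB]
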